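-- pv_equiv track=rewrite | github.com/roytripandipta/BTP | fem_utilities.py | make_BC
-- ===== SOURCE A (Python) =====
-- def make_BC(Node_Data):
--     NDOF = 2 * len(Node_Data)
--     BC = [[0 for row in range(1)] for col in range(NDOF)]  # required matrix for BCs
--     for x in Node_Data:
--         if x[1] == 0:
--             BC[2 * (x[0] - 1)][0] = 1
--             BC[2 * (x[0] - 1) + 1][0] = 1
--
--     return BC
-- ===== SOURCE B (Python) =====
-- def make_BC(Node_Data):
--     flagged = {x[0] for x in Node_Data if x[1] == 0}
--     return [[1] if (i // 2 + 1) in flagged else [0]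
--             for i in range(2 * len(Node_Data))]
-- ===== Notes on version B (the rewrite author's own statement) =====
-- stated objective: alternative
-- what changed: Replaces A's scatter-writes into a preallocated zero matrix (indexed assignment per flagged node) by building a set of flagged node ids once and generating the BC matrix with a single gather pass over the DOF indices (1 if i//2+1 is flagged, else 0).
-- intended difference: On inputs with a flagged node id k <= 0 whose wrap target n+k is not itself flagged, A's negative index 2*(k-1) wraps around and A marks the rows of node n+k as constrained, while B leaves them 0; B's value is intended because a non-positive node id names no DOF row. — e.g. on make_BC([[0, 0]]): A returns [[1], [1]], B returns [[0], [0]]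
import Mathlib
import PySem

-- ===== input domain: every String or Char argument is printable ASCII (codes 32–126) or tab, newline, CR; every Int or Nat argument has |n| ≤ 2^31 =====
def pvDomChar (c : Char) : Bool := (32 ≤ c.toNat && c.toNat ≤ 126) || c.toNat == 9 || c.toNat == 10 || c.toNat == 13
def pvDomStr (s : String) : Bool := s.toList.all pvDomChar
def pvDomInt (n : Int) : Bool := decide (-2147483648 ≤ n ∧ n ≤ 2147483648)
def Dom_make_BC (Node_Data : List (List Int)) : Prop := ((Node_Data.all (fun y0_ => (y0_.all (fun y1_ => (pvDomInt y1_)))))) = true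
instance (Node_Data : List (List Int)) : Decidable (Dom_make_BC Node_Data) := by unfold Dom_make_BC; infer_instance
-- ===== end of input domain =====

-- B replaces A's scatter-writes into a preallocated zero matrix by a flagged-id set plus one
-- output-driven gather pass over the DOF indices (objective: alternative decomposition, same cost).

-- ===== PORT A =====
-- loop body of A's for-loop, as a helper (the two subscript assignments BC[...][0] = 1)
def stepA (BC : List (List Int)) (x : List Int) : List (List Int) :=
  if PySem.List.pyGetD x 1 0 = 0 then
    let i : Int := 2 * (PySem.List.pyGetD x 0 0 - 1)
    let BC1 := PySem.List.pySetD BC i (PySem.List.pySetD (PySem.List.pyGetD BC i []) 0 1)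
    PySem.List.pySetD BC1 (i + 1) (PySem.List.pySetD (PySem.List.pyGetD BC1 (i + 1) []) 0 1)
  else BC

def make_BC (Node_Data : List (List Int)) : List (List Int) :=
  let NDOF : Int := 2 * PySem.List.len Node_Data
  let BC : List (List Int) :=
    (PySem.List.pyRange 0 NDOF 1).map (fun _ =>
      (PySem.List.pyRange 0 1 1).map (fun _ => (0 : Int)))
  Node_Data.foldl stepA BC

-- ===== PORT B =====
def make_BC_alt (Node_Data : List (List Int)) : List (List Int) :=
  let flagged : PySem.Set Int :=
    PySem.Set.ofList ((Node_Data.filter (fun x => PySem.List.pyGetD x 1 0 == 0)).map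
      (fun x => PySem.List.pyGetD x 0 0))
  (PySem.List.pyRange 0 (2 * PySem.List.len Node_Data) 1).map (fun i =>
    [if PySem.Set.contains flagged (PySem.Int.floordiv i 2 + 1) then (1 : Int) else 0])

-- ===== PRECONDITION & SPEC =====
-- Pre_ excludes exactly the inputs on which A raises: a row with fewer than two entries
-- (IndexError on x[0]/x[1]) or a flagged node id outside [1-n, n] (IndexError on BC).
def Pre_make_BC (Node_Data : List (List Int)) : Prop :=
  ∀ x ∈ Node_Data, 2 ≤ x.length ∧
    (x.getD 1 0 = 0 →
      1 - (Node_Data.length : Int) ≤ x.getD 0 0 ∧ x.getD 0 0 ≤ (Node_Data.length : Int))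
instance (Node_Data : List (List Int)) : Decidable (Pre_make_BC Node_Data) := by
  unfold Pre_make_BC; infer_instance
def pvWitness_make_BC : List (List Int) := [[1, 0], [2, 1]]

-- On inputs with a flagged node id k ≤ 0 whose wrap target n+k is not itself flagged, A's
-- negative index 2*(k-1) wraps around so A marks the rows of node n+k as constrained; B leaves
-- them 0, which is intended: a non-positive node id names no DOF row.
def D_make_BC (Node_Data : List (List Int)) : Prop :=
  ∃ x ∈ Node_Data, x.getD 1 0 = 0 ∧ x.getD 0 0 ≤ 0 ∧
    ¬ ∃ y ∈ Node_Data, y.getD 1 0 = 0 ∧ y.getD 0 0 = (Node_Data.length : Int) + x.getD 0 0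
instance (Node_Data : List (List Int)) : Decidable (D_make_BC Node_Data) := by
  unfold D_make_BC; infer_instance

def Spec_make_BC (Node_Data : List (List Int)) (out : List (List Int)) : Prop :=
  ¬ D_make_BC Node_Data → out = make_BC_alt Node_Data
instance (Node_Data : List (List Int)) (out : List (List Int)) : Decidable (Spec_make_BC Node_Data out) := by
  unfold Spec_make_BC; infer_instance

def pvDiffWitness_make_BC : List (List Int) := [[0, 0]]
def pvDiffWitnessOut_make_BC : (List (List Int)) × (List (List Int)) := ([[1], [1]], [[0], [0]])

-- ===== CLAIM (what is proved, stated in full; the proofs are below) =====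
def Claim_unchanged_make_BC : Prop := ∀ (Node_Data : List (List Int)), Dom_make_BC Node_Data → Pre_make_BC Node_Data → Spec_make_BC Node_Data (make_BC Node_Data)
def Claim_changed_make_BC : Prop := Dom_make_BC (pvDiffWitness_make_BC) ∧ Pre_make_BC (pvDiffWitness_make_BC) ∧ D_make_BC (pvDiffWitness_make_BC) ∧ make_BC (pvDiffWitness_make_BC) = pvDiffWitnessOut_make_BC.1 ∧ make_BC_alt (pvDiffWitness_make_BC) = pvDiffWitnessOut_make_BC.2 ∧ pvDiffWitnessOut_make_BC.1 ≠ pvDiffWitnessOut_make_BC.2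
def Claim_exact_make_BC : Prop := ∀ (Node_Data : List (List Int)), Dom_make_BC Node_Data → Pre_make_BC Node_Data → D_make_BC Node_Data → make_BC Node_Data ≠ make_BC_alt Node_Data

-- ===== LEMMAS AND PROOFS =====

theorem pySetD_norm {α : Type} (xs : List α) (i : Int) (v : α)
    (h1 : -(xs.length : Int) ≤ i) (h2 : i < xs.length) :
    PySem.List.pySetD xs i v = xs.set (if 0 ≤ i then i.toNat else (i + xs.length).toNat) v := by
  simp only [PySem.List.pySetD, PySem.List.pySet?, PySem.List.pyIdx?]
  split_ifs <;> simp <;> try omega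
  all_goals (try congr 1) <;> omega

theorem pyGetD_norm {α : Type} (xs : List α) (i : Int) (d : α)
    (h1 : -(xs.length : Int) ≤ i) (h2 : i < xs.length) :
    PySem.List.pyGetD xs i d = xs.getD (if 0 ≤ i then i.toNat else (i + xs.length).toNat) d := by
  simp only [PySem.List.pyGetD, PySem.List.pyGet?, PySem.List.pyIdx?]
  split_ifs <;> simp <;> try omega
  have e : xs.length - (-i).toNat = (i + xs.length).toNat := by omega
  rw [e]

-- A's write condition for output row r (n = number of nodes): node r/2+1 is flagged either
-- directly or through the wrapped negative index of node id r/2+1-n.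
def condA (n : Nat) (x : List Int) (r : Nat) : Bool :=
  x.getD 1 0 == 0 &&
    (((r / 2 : Nat) : Int) + 1 == x.getD 0 0 || ((r / 2 : Nat) : Int) + 1 == x.getD 0 0 + n)

-- B's write condition: node r/2+1 is flagged.
def condB (x : List Int) (r : Nat) : Bool :=
  x.getD 1 0 == 0 && x.getD 0 0 == ((r / 2 : Nat) : Int) + 1

theorem stepA_char (n : Nat) (BC : List (List Int)) (x : List Int)
    (hlen : BC.length = 2 * n)
    (hrows : ∀ row ∈ BC, row = [0] ∨ row = [1])
    (hxb : x.getD 1 0 = 0 → 1 - (n : Int) ≤ x.getD 0 0 ∧ x.getD 0 0 ≤ n) :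
    (stepA BC x).length = 2 * n ∧
    (∀ row ∈ stepA BC x, row = [0] ∨ row = [1]) ∧
    ∀ r : Nat, r < 2 * n →
      (stepA BC x)[r]? = if condA n x r then some [1] else BC[r]? := by
  have e1 : PySem.List.pyGetD x 1 (0:Int) = x.getD 1 0 := by simp [PySem.List.pyGetD_ofNat']
  have e0 : PySem.List.pyGetD x 0 (0:Int) = x.getD 0 0 := by simp [PySem.List.pyGetD_ofNat']
  by_cases hf : PySem.List.pyGetD x 1 0 = 0
  · have hflag : x.getD 1 0 = 0 := by rw [← e1]; exact hf
    obtain ⟨hk1, hk2⟩ := hxb hflag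
    have hn1 : 1 ≤ n := by by_contra h; omega
    simp only [stepA, hf, if_true, e0, if_pos]
    set k : Int := x.getD 0 0 with hkdef
    set i : Int := 2 * (k - 1) with hidef
    set t : Nat := if 0 ≤ i then i.toNat else (i + (2*n : Nat)).toNat with htdef
    have hirange : -(BC.length : Int) ≤ i ∧ i < BC.length := by rw [hlen]; omega
    have htlt : t + 1 < 2*n := by rw [htdef]; split_ifs <;> omega
    have hti : (if 0 ≤ i then i.toNat else (i + (BC.length:Int)).toNat) = t := by
      rw [htdef, hlen]
    have hti1 : (if 0 ≤ (i+1) then (i+1).toNat else ((i+1) + (BC.length:Int)).toNat) = t + 1 := by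
      rw [htdef, hlen]; split_ifs <;> try omega
    have hrow1 : PySem.List.pySetD (PySem.List.pyGetD BC i []) 0 1 = [1] := by
      rw [pyGetD_norm BC i [] hirange.1 hirange.2, hti]
      have hmem : BC.getD t [] ∈ BC := by
        rw [List.getD_eq_getElem BC [] (by omega)]; exact List.getElem_mem _
      rcases hrows _ hmem with h | h <;> rw [h] <;> decide
    have hset1 : PySem.List.pySetD BC i (PySem.List.pySetD (PySem.List.pyGetD BC i []) 0 1)
        = BC.set t [1] := by
      rw [hrow1, pySetD_norm BC i [1] hirange.1 hirange.2, hti]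
    rw [hset1]
    have hlen1 : (BC.set t [1]).length = 2*n := by simp [hlen]
    have hirange1 : -((BC.set t [1]).length : Int) ≤ i + 1 ∧ i + 1 < (BC.set t [1]).length := by
      rw [hlen1]; omega
    have hg1 : (BC.set t [1]).getD (t+1) [] = BC.getD (t+1) [] := by
      rw [List.getD_eq_getElem _ [] (by rw [hlen1]; omega),
          List.getD_eq_getElem BC [] (by omega)]
      simp [List.getElem_set, (by omega : ¬ t = t+1)]
    have hrow2 : PySem.List.pySetD (PySem.List.pyGetD (BC.set t [1]) (i+1) []) 0 1 = [1] := by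
      rw [pyGetD_norm _ (i+1) [] hirange1.1 hirange1.2]
      simp only [List.length_set]
      rw [hti1, hg1]
      have hmem : BC.getD (t+1) [] ∈ BC := by
        rw [List.getD_eq_getElem BC [] (by omega)]; exact List.getElem_mem _
      rcases hrows _ hmem with h | h <;> rw [h] <;> decide
    have hset2 : PySem.List.pySetD (BC.set t [1]) (i+1)
          (PySem.List.pySetD (PySem.List.pyGetD (BC.set t [1]) (i+1) []) 0 1)
        = (BC.set t [1]).set (t+1) [1] := by
      rw [hrow2, pySetD_norm _ (i+1) [1] hirange1.1 hirange1.2]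
      simp only [List.length_set]
      rw [hti1]
    rw [hset2]
    refine ⟨by simp [hlen], ?_, ?_⟩
    · intro row hm
      rcases List.mem_or_eq_of_mem_set hm with hm1 | hm1
      · rcases List.mem_or_eq_of_mem_set hm1 with hm2 | hm2
        · exact hrows _ hm2
        · right; exact hm2
      · right; exact hm1
    · intro r hr
      have hcond : condA n x r = true ↔ (r = t ∨ r = t + 1) := by
        simp only [condA, hflag, ← hkdef, beq_iff_eq, Bool.and_eq_true, Bool.or_eq_true,
          decide_eq_true_eq]
        constructor
        · rintro ⟨-, h | h⟩ <;> split_ifs at htdef <;> omega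
        · intro h; refine ⟨trivial, ?_⟩; split_ifs at htdef <;> omega
      by_cases hc : condA n x r = true
      · rw [if_pos hc]
        rcases hcond.mp hc with h | h <;> subst h
        · rw [List.getElem?_set_ne (by omega)]
          rw [List.getElem?_set_eq_of_lt _ (by omega)]
        · rw [List.getElem?_set_eq_of_lt _ (by rw [hlen1]; omega)]
      · rw [if_neg hc]
        have hne : ¬ (r = t ∨ r = t + 1) := fun h => hc (hcond.mpr h)
        rw [List.getElem?_set_ne (by omega), List.getElem?_set_ne (by omega)]
  · have hflag : ¬ x.getD 1 0 = 0 := by rw [← e1]; exact hf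
    have hb : (x.getD 1 0 == (0:Int)) = false := by simpa using hflag
    simp only [stepA, if_neg hf]
    refine ⟨hlen, hrows, fun r hr => ?_⟩
    simp only [condA]
    simp only [hb, Bool.false_and, Bool.false_eq_true, if_false]

theorem foldA_char (n : Nat) (l : List (List Int)) (BC : List (List Int))
    (hlen : BC.length = 2 * n)
    (hrows : ∀ row ∈ BC, row = [0] ∨ row = [1])
    (hl : ∀ x ∈ l, x.getD 1 0 = 0 → 1 - (n : Int) ≤ x.getD 0 0 ∧ x.getD 0 0 ≤ n) :
    (l.foldl stepA BC).length = 2 * n ∧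
    ∀ r : Nat, r < 2 * n →
      (l.foldl stepA BC)[r]? = if l.any (fun x => condA n x r) then some [1] else BC[r]? := by
  induction l generalizing BC with
  | nil => exact ⟨hlen, fun r hr => by simp⟩
  | cons x l ih =>
    obtain ⟨h1, h2, h3⟩ := stepA_char n BC x hlen hrows (hl x (by simp))
    obtain ⟨ih1, ih2⟩ := ih (stepA BC x) h1 h2 (fun y hy => hl y (by simp [hy]))
    refine ⟨ih1, fun r hr => ?_⟩
    rw [List.foldl_cons, ih2 r hr, h3 r hr, List.any_cons]
    by_cases hx : condA n x r = true
    · simp [hx]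
    · simp [hx]

theorem makeA_char (ND : List (List Int)) (hp : Pre_make_BC ND) :
    (make_BC ND).length = 2 * ND.length ∧
    ∀ r : Nat, r < 2 * ND.length →
      (make_BC ND)[r]? = some (if ND.any (fun x => condA ND.length x r) then [1] else [0]) := by
  have hin : (PySem.List.pyRange 0 1 1).map (fun _ => (0:Int)) = [0] := by decide
  have hlen2 : 2 * PySem.List.len ND = ((2 * ND.length : Nat) : Int) := by
    simp [PySem.List.len_eq]
  have hinit : ((PySem.List.pyRange 0 (2 * PySem.List.len ND) 1).map
      (fun _ => (PySem.List.pyRange 0 1 1).map (fun _ => (0:Int))))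
      = List.replicate (2 * ND.length) [0] := by
    rw [hlen2, PySem.List.pyRange_zero_natCast, hin]
    simp [← List.map_eq_flatMap, Function.comp_def, List.map_const']
  simp only [make_BC]
  rw [hinit]
  obtain ⟨h1, h2⟩ := foldA_char ND.length ND (List.replicate (2 * ND.length) [0])
    (by simp) (by intro row hr; left; exact (List.eq_of_mem_replicate hr))
    (fun x hx => (hp x hx).2)
  refine ⟨h1, fun r hr => ?_⟩
  rw [h2 r hr, List.getElem?_replicate_of_lt hr]
  by_cases hc : ND.any (fun x => condA ND.length x r) = true <;> simp [hc]

theorem makeB_char (ND : List (List Int)) :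
    (make_BC_alt ND).length = 2 * ND.length ∧
    ∀ r : Nat, r < 2 * ND.length →
      (make_BC_alt ND)[r]? = some (if ND.any (fun x => condB x r) then [1] else [0]) := by
  have hlen2 : 2 * PySem.List.len ND = ((2 * ND.length : Nat) : Int) := by
    simp [PySem.List.len_eq]
  have hrange : PySem.List.pyRange 0 (2 * PySem.List.len ND) 1
      = (List.range (2 * ND.length)).map (fun k => ((k : Nat) : Int)) := by
    rw [hlen2, PySem.List.pyRange_zero_natCast]
  have hcont : ∀ m : Int,
      PySem.Set.contains (PySem.Set.ofList ((ND.filter (fun x => PySem.List.pyGetD x 1 0 == 0)).map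
        (fun x => PySem.List.pyGetD x 0 0))) m
      = ND.any (fun x => x.getD 1 0 == 0 && x.getD 0 0 == m) := by
    intro m
    rw [Bool.eq_iff_iff]
    simp only [PySem.Set.contains_iff, PySem.Set.mem_ofList, List.mem_map, List.mem_filter,
      List.any_eq_true, Bool.and_eq_true, beq_iff_eq, PySem.List.pyGetD_ofNat']
    constructor
    · rintro ⟨x, ⟨hx, h1⟩, h0⟩; exact ⟨x, hx, h1, h0⟩
    · rintro ⟨x, hx, h1, h0⟩; exact ⟨x, ⟨hx, h1⟩, h0⟩
  simp only [make_BC_alt]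
  rw [hrange, List.map_map]
  refine ⟨by simp, fun r hr => ?_⟩
  rw [List.getElem?_map, List.getElem?_range hr]
  simp only [Option.map_some, Function.comp_apply]
  have hfd : PySem.Int.floordiv (r : Int) 2 = ((r / 2 : Nat) : Int) := by
    exact_mod_cast PySem.Int.floordiv_natCast r 2
  rw [hfd, hcont]
  have : ND.any (fun x => x.getD 1 0 == 0 && x.getD 0 0 == ((r / 2 : Nat) : Int) + 1)
      = ND.any (fun x => condB x r) := by
    simp [condB]
  rw [this]
  by_cases hc : ND.any (fun x => condB x r) = true <;> simp [hc]

-- ===== VERDICT (by name: the statement is the Claim_ definition above) =====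
theorem make_BC_spec : Claim_unchanged_make_BC := by
  intro ND _ hp hnd
  have hnd' : ∀ x ∈ ND, x.getD 1 0 = 0 → x.getD 0 0 ≤ 0 →
      ∃ y ∈ ND, y.getD 1 0 = 0 ∧ y.getD 0 0 = (ND.length : Int) + x.getD 0 0 := by
    intro x hx h1 h0
    by_contra hno
    exact hnd ⟨x, hx, h1, h0, hno⟩
  obtain ⟨hAl, hAp⟩ := makeA_char ND hp
  obtain ⟨hBl, hBp⟩ := makeB_char ND
  apply List.ext_getElem?
  intro r
  by_cases hr : r < 2 * ND.length
  · rw [hAp r hr, hBp r hr]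
    have hany : (ND.any fun x => condA ND.length x r) = (ND.any fun x => condB x r) := by
      rw [Bool.eq_iff_iff]
      simp only [List.any_eq_true, condA, condB, Bool.and_eq_true, Bool.or_eq_true, beq_iff_eq]
      constructor
      · rintro ⟨x, hx, h1, h0 | h0⟩
        · exact ⟨x, hx, h1, h0.symm⟩
        · have hb := (hp x hx).2 h1
          have hx0 : x.getD 0 0 ≤ 0 := by omega
          obtain ⟨y, hy, hy1, hy0⟩ := hnd' x hx h1 hx0
          exact ⟨y, hy, hy1, by omega⟩
      · rintro ⟨x, hx, h1, h0⟩
        exact ⟨x, hx, h1, Or.inl h0.symm⟩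
    rw [hany]
  · rw [List.getElem?_eq_none (by rw [hAl]; omega),
        List.getElem?_eq_none (by rw [hBl]; omega)]

theorem make_BC_changed : Claim_changed_make_BC := by
  unfold Claim_changed_make_BC; decide

theorem make_BC_tight : Claim_exact_make_BC := by
  intro ND _ hp hd heq
  obtain ⟨x, hx, h1, h0, hno⟩ := hd
  obtain ⟨hk1, hk2⟩ := (hp x hx).2 h1
  have hn1 : 0 < ND.length := List.length_pos_of_mem hx
  set n := ND.length with hn
  set r : Nat := (2 * ((n : Int) + x.getD 0 0 - 1)).toNat with hrdef
  have hr : r < 2 * n := by omega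
  obtain ⟨hAl, hAp⟩ := makeA_char ND hp
  obtain ⟨hBl, hBp⟩ := makeB_char ND
  have h := congrArg (fun l => l[r]?) heq
  simp only at h
  rw [hAp r hr, hBp r hr] at h
  have hAany : (ND.any fun y => condA n y r) = true := by
    simp only [List.any_eq_true, condA, Bool.and_eq_true, Bool.or_eq_true, beq_iff_eq]
    exact ⟨x, hx, by simpa using h1, Or.inr (by omega)⟩
  have hBany : (ND.any fun y => condB y r) = false := by
    rw [Bool.eq_false_iff]
    intro hc
    simp only [List.any_eq_true, condB, Bool.and_eq_true, beq_iff_eq] at hc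
    obtain ⟨y, hy, hy1, hy0⟩ := hc
    exact hno ⟨y, hy, by simpa using hy1, by omega⟩
  rw [hAany, hBany] at h
  simp at h
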